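-- pv_equiv track=rewrite | github.com/cge-tubingens/paper-fetcher | paper_fetcher/affi_cleaner.py | web_formatter
-- ===== SOURCE A (Python) =====
-- def web_formatter(string:str)->str:
--
--     if string is None: return None
--
--     result = ''
--
--     splitted = string.split(' ')
--
--     for subs in splitted:
--         if subs.endswith('.'):
--             # Remove all periods except the last one
--             result += (subs[:-1].replace('.', '') + '. ')
--         else:
--             # Remove all periods
--             result += (subs.replace('.', '') + ' ')
--     return result
-- ===== SOURCE B (Python) =====
-- def web_formatter(string):
--     if string is None:
--         return None
--     n = len(string)
--     out = []
--     for i, c in enumerate(string):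
--         if c != '.':
--             out.append(c)
--         elif i == n - 1 or string[i + 1] == ' ':
--             out.append(c)
--     return ''.join(out) + ' '
-- ===== Notes on version B (the rewrite author's own statement) =====
-- stated objective: simpler
-- what changed: Replaces split-on-space plus per-token slice/replace passes by a single left-to-right scan that keeps a period only when it is followed by a space or ends the string, then appends the trailing space.
import Mathlib
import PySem

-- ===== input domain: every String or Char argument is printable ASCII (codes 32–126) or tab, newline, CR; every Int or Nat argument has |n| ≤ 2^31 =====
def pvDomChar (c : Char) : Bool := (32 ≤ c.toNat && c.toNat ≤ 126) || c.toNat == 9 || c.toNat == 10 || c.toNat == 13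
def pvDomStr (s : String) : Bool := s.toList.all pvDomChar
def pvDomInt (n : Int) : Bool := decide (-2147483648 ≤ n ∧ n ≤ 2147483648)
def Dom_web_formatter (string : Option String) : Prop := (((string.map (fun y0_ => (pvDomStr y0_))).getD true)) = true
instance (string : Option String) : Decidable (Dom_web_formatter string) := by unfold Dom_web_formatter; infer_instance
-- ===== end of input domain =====

-- B replaces split-on-space + per-token period stripping by a single lookahead scan
-- (keep a period iff the next char is a space or it ends the string); objective: simpler, same cost.

-- ===== PORT A =====
-- A: split on ' ', per token strip periods (keeping a trailing one), append token + ' '.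
def web_formatter (string : Option String) : Option String :=
  match string with
  | none => none
  | some s =>
    let splitted := PySem.Chars.splitOn s.toList [' ']
    let result := splitted.foldl (fun result subs =>
      if PySem.Chars.endswith subs ['.'] then
        result ++ (PySem.Chars.replace (PySem.Chars.slice subs none (some (-1))) ['.'] [] ++ ['.', ' '])
      else
        result ++ (PySem.Chars.replace subs ['.'] [] ++ [' '])) []
    some (String.ofList result)

-- ===== PORT B =====
-- B: one left-to-right scan; a period is copied only when followed by a space or at the end.
def scanKeep : List Char → List Char
  | [] => []
  | c :: rest =>
    if c ≠ '.' then c :: scanKeep rest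
    else
      match rest with
      | [] => c :: scanKeep rest
      | d :: _ => if d = ' ' then c :: scanKeep rest else scanKeep rest

def web_formatter_alt (string : Option String) : Option String :=
  match string with
  | none => none
  | some s => some (String.ofList (scanKeep s.toList ++ [' ']))

-- ===== PRECONDITION & SPEC =====
def Spec_web_formatter (string : Option String) (out : Option String) : Prop := out = web_formatter_alt string
instance (string : Option String) (out : Option String) : Decidable (Spec_web_formatter string out) := by unfold Spec_web_formatter; infer_instance

-- ===== CLAIM (what is proved, stated in full; the proofs are below) =====
def Claim_equal_web_formatter : Prop := ∀ (string : Option String), Dom_web_formatter string → Spec_web_formatter string (web_formatter string)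

-- ===== LEMMAS AND PROOFS =====

-- (first token, later tokens) of a split on ' '
def tokP : List Char → List Char × List (List Char)
  | [] => ([], [])
  | c :: cs =>
    if c = ' ' then ([], (tokP cs).1 :: (tokP cs).2)
    else (c :: (tokP cs).1, (tokP cs).2)

-- what A does to one token
def procA (t : List Char) : List Char :=
  if PySem.Chars.endswith t ['.'] then
    (t.dropLast.filter (fun c => !('.' == c))) ++ ['.', ' ']
  else
    (t.filter (fun c => !('.' == c))) ++ [' ']

theorem replace_go_dot (l : List Char) : ∀ (fuel : Nat) (acc : List Char), l.length ≤ fuel →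
    PySem.Chars.replace.go ['.'] [] fuel l acc = acc.reverse ++ l.filter (fun c => !('.' == c)) := by
  induction l with
  | nil => intro fuel acc _; cases fuel <;> simp [PySem.Chars.replace.go]
  | cons c t ih =>
    intro fuel acc h
    cases fuel with
    | zero => simp at h
    | succ f =>
      simp only [PySem.Chars.replace.go, List.isPrefixOf, Bool.and_true]
      by_cases hc : ('.' == c) = true
      · rw [if_pos hc]
        simp only [List.filter_cons, hc, Bool.not_true, List.reverse_nil, List.nil_append]
        exact ih f acc (by simpa using h)
      · rw [if_neg hc]
        simp only [Bool.not_eq_true] at hc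
        rw [ih f (c :: acc) (by simpa using Nat.le_of_succ_le_succ h)]
        simp [hc]

theorem replace_dot (l : List Char) :
    PySem.Chars.replace l ['.'] [] = l.filter (fun c => !('.' == c)) := by
  simpa using replace_go_dot l l.length [] le_rfl

theorem splitOn_go_space (l : List Char) : ∀ (fuel : Nat) (cur : List Char) (acc : List (List Char)),
    l.length + 1 ≤ fuel →
    PySem.Chars.splitOn.go [' '] fuel l cur acc =
      acc.reverse ++ ((cur.reverse ++ (tokP l).1) :: (tokP l).2) := by
  induction l with
  | nil => intro fuel cur acc h; cases fuel with
    | zero => simp at h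
    | succ f => simp [PySem.Chars.splitOn.go, tokP]
  | cons c t ih =>
    intro fuel cur acc h
    cases fuel with
    | zero => simp at h
    | succ f =>
      simp only [PySem.Chars.splitOn.go, List.isPrefixOf, Bool.and_true]
      by_cases hc : (' ' == c) = true
      · rw [if_pos hc]
        simp only [List.length_singleton, List.drop_succ_cons, List.drop_zero]
        rw [ih f [] (cur.reverse :: acc) (by simpa using Nat.le_of_succ_le_succ h)]
        have hce : c = ' ' := (beq_iff_eq.mp hc).symm
        have etok : tokP (c :: t) = ([], (tokP t).1 :: (tokP t).2) := by simp [tokP, hce]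
        rw [etok]
        simp
      · rw [if_neg hc]
        simp only [Bool.not_eq_true] at hc
        rw [ih f (c :: cur) acc (by simpa using Nat.le_of_succ_le_succ h)]
        have hce : ¬ c = ' ' := fun e => by simp [e] at hc
        have etok : tokP (c :: t) = (c :: (tokP t).1, (tokP t).2) := by simp [tokP, hce]
        rw [etok]
        simp

theorem splitOn_space (l : List Char) :
    PySem.Chars.splitOn l [' '] = (tokP l).1 :: (tokP l).2 := by
  simpa using splitOn_go_space l (l.length + 1) [] [] le_rfl

-- A's loop body, after rewriting replace and slice, is `acc ++ procA subs`
theorem body_eq_procA (acc subs : List Char) :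
    (if PySem.Chars.endswith subs ['.'] then
        acc ++ (PySem.Chars.replace (PySem.Chars.slice subs none (some (-1))) ['.'] [] ++ ['.', ' '])
      else
        acc ++ (PySem.Chars.replace subs ['.'] [] ++ [' '])) = acc ++ procA subs := by
  have hs : PySem.List.slice subs none (some (-1)) = subs.dropLast := by
    simp [PySem.List.slice, List.dropLast_eq_take]
  unfold procA
  by_cases h : PySem.Chars.endswith subs ['.']
  · rw [if_pos h, if_pos h, replace_dot, PySem.Chars.slice_eq_listSlice, hs]
  · rw [if_neg h, if_neg h, replace_dot]

-- one lemma for both head cases: popping a head that cannot itself be the kept '.' keeps endswith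
theorem endswith_cons (c : Char) (t : List Char) (h : ¬ (c = '.' ∧ t = [])) :
    PySem.Chars.endswith (c :: t) ['.'] = PySem.Chars.endswith t ['.'] := by
  have key : (['.'] <:+ c :: t) ↔ (['.'] <:+ t) := by
    rw [List.suffix_cons_iff]
    constructor
    · rintro (h2 | h2)
      · cases h2; exact absurd ⟨rfl, rfl⟩ h
      · exact h2
    · exact Or.inr
  simp only [PySem.Chars.endswith]
  rw [Bool.eq_iff_iff, List.isSuffixOf_iff_suffix, List.isSuffixOf_iff_suffix]
  exact key

theorem procA_cons_ne {c : Char} (t : List Char) (hc : c ≠ '.') :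
    procA (c :: t) = c :: procA t := by
  unfold procA
  rw [endswith_cons c t (fun h2 => hc h2.1)]
  by_cases h : PySem.Chars.endswith t ['.'] = true
  · have ht : t ≠ [] := by
      intro e; subst e; exact absurd h (by decide)
    cases t with
    | nil => exact absurd rfl ht
    | cons d r => simp [h, Ne.symm hc]
  · simp [h, Ne.symm hc]

theorem procA_cons_dot (t : List Char) (ht : t ≠ []) :
    procA ('.' :: t) = procA t := by
  unfold procA
  rw [endswith_cons '.' t (fun h2 => ht h2.2)]
  by_cases h : PySem.Chars.endswith t ['.'] = true
  · cases t with
    | nil => exact absurd rfl ht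
    | cons d r => simp [h]
  · simp [h]

theorem tokP_fst_nonnil {d : Char} (cs : List Char) (hd : d ≠ ' ') :
    (tokP (d :: cs)).1 ≠ [] := by
  simp [tokP, hd]

-- the heart: A's per-token output, flattened, is B's scan plus the trailing space
theorem main_lemma (cs : List Char) :
    procA (tokP cs).1 ++ ((tokP cs).2.flatMap procA) = scanKeep cs ++ [' '] := by
  induction cs with
  | nil => simp [tokP, procA, PySem.Chars.endswith, scanKeep]
  | cons c rest ih =>
    by_cases hsp : c = ' '
    · subst hsp
      have etok : tokP (' ' :: rest) = ([], (tokP rest).1 :: (tokP rest).2) := by simp [tokP]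
      have escan : scanKeep (' ' :: rest) = ' ' :: scanKeep rest := by simp [scanKeep]
      rw [etok, escan]
      simp only [List.flatMap_cons]
      rw [ih]
      simp [procA, PySem.Chars.endswith, List.isSuffixOf]
    · have etok : tokP (c :: rest) = (c :: (tokP rest).1, (tokP rest).2) := by simp [tokP, hsp]
      by_cases hdot : c = '.'
      · subst hdot
        cases rest with
        | nil =>
          simp [tokP, scanKeep, procA, PySem.Chars.endswith, List.isSuffixOf]
        | cons d rest' =>
          by_cases hd : d = ' '
          · subst hd
            have h1 : (tokP (' ' :: rest')).1 = [] := by simp [tokP]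
            have escan : scanKeep ('.' :: ' ' :: rest') = '.' :: scanKeep (' ' :: rest') := by
              simp [scanKeep]
            have hpa : procA ['.'] = '.' :: procA [] := by decide
            rw [h1] at ih
            rw [etok, escan, h1, hpa, List.cons_append, ih]
            simp
          · have h1 : (tokP (d :: rest')).1 ≠ [] := tokP_fst_nonnil rest' hd
            have escan : scanKeep ('.' :: d :: rest') = scanKeep (d :: rest') := by
              simp [scanKeep, hd]
            rw [etok, escan, procA_cons_dot _ h1, ih]
      · have escan : scanKeep (c :: rest) = c :: scanKeep rest := by simp [scanKeep, hdot]
        rw [etok, escan, procA_cons_ne _ hdot, List.cons_append, ih]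
        simp

theorem foldl_body (l : List (List Char)) (init : List Char) :
    l.foldl (fun result subs =>
      if PySem.Chars.endswith subs ['.'] then
        result ++ (PySem.Chars.replace (PySem.Chars.slice subs none (some (-1))) ['.'] [] ++ ['.', ' '])
      else
        result ++ (PySem.Chars.replace subs ['.'] [] ++ [' '])) init = init ++ l.flatMap procA := by
  induction l generalizing init with
  | nil => simp
  | cons t r ih => rw [List.foldl_cons, body_eq_procA, ih]; simp

-- ===== VERDICT (by name: the statement is the Claim_ definition above) =====
theorem web_formatter_spec : Claim_equal_web_formatter := by
  intro string _
  unfold Spec_web_formatter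
  cases string with
  | none => rfl
  | some s =>
    simp only [web_formatter, web_formatter_alt]
    rw [splitOn_space, foldl_body]
    simp only [List.nil_append, List.flatMap_cons]
    rw [main_lemma]
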